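-- pv_equiv track=rewrite | github.com/labuwx/progpuzzles | advent_of_code/2015/14/14.py | race_for
-- ===== SOURCE A (Python) =====
-- def race_for(deers, time):
--     state = {
--         name: {'dist': 0, 'score': 0, 'running': 1, 'switcht': speed['runtime']}
--         for name, speed in deers.items()
--     }
--     for t in range(1, time + 1):
--         dist_max = 0
--         for name, st in state.items():
--             deer = deers[name]
--             st['dist'] += st['running'] * deer['speed']
--             dist_max = max(dist_max, st['dist'])
--             if t == st['switcht']:
--                 st['switcht'] = t + (
--                     deer['resttime'] if st['running'] else deer['runtime']
--                 )
--                 st['running'] = (st['running'] + 1) % 2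
--         for st in state.values():
--             st['score'] += st['dist'] == dist_max
--
--     return state
-- ===== SOURCE B (Python) =====
-- def race_for(deers, time):
--     sims = []
--     for name, deer in deers.items():
--         dist, running, switcht = 0, 1, deer['runtime']
--         trace = []
--         for t in range(1, time + 1):
--             dist += running * deer['speed']
--             if t == switcht:
--                 switcht = t + (deer['resttime'] if running else deer['runtime'])
--                 running = (running + 1) % 2
--             trace.append(dist)
--         sims.append((name, (dist, running, switcht, trace)))
--     scores = [0 for _ in deers]
--     for i in range(time):
--         m = max([0] + [s[1][3][i] for s in sims])
--         scores = [sc + (s[1][3][i] == m) for sc, s in zip(scores, sims)]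
--     return {
--         s[0]: {'dist': s[1][0], 'score': sc, 'running': s[1][1], 'switcht': s[1][2]}
--         for s, sc in zip(sims, scores)
--     }
-- ===== Notes on version B (the rewrite author's own statement) =====
-- stated objective: alternative
-- what changed: A's single time-major loop that mutates a shared per-deer state dict and a running max each second is replaced by independent per-deer simulations that record a distance trace, followed by a separate per-second scoring pass over the traces.
import Mathlib
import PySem

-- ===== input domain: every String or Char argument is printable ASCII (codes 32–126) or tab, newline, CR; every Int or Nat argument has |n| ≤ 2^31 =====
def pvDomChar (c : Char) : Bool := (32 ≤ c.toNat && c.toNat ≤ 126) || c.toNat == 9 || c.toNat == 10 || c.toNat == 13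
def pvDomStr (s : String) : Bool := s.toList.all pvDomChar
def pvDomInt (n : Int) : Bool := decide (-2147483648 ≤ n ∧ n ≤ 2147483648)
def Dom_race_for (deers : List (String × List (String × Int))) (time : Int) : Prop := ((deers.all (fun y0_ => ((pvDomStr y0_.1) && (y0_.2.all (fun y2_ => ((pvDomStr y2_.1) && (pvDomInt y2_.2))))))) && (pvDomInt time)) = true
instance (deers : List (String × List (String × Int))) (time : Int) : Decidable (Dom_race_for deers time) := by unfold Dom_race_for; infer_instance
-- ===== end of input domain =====

-- B replaces A's time-major loop over a shared mutable state dict by independent per-deer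
-- simulations recording a distance trace, plus a separate per-second scoring pass (objective: alternative).

-- ===== PORT A =====
-- A's `state` is an insertion-ordered dict name ↦ {dist, score, running, switcht}; its key set never
-- changes, so it is carried as its items list and in-place value mutation rebuilds the entry.
-- Missing-key dict reads use getD with default 0/[]: Pre_ excludes every input where Python raises KeyError.

-- the first inner loop's body for one entry: st['dist'] += …; if t == st['switcht']: …
def raceUpd (deers : List (String × List (String × Int))) (t : Int)
    (p : String × PySem.Dict String Int) : PySem.Dict String Int :=
  let deer := PySem.Dict.mk ((PySem.Dict.mk deers).getD p.1 [])   -- deer = deers[name]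
  let st := p.2.insert "dist" (p.2.getD "dist" 0 + p.2.getD "running" 0 * deer.getD "speed" 0)
  if t == st.getD "switcht" 0 then
    (st.insert "switcht"
        (t + (if st.getD "running" 0 != 0 then deer.getD "resttime" 0 else deer.getD "runtime" 0))).insert
      "running" (PySem.Int.mod (st.getD "running" 0 + 1) 2)
  else st

-- one iteration of `for t in range(1, time+1)`: the two inner loops.  The switcht branch does not
-- touch st['dist'], so reading st['dist'] from the fully updated entry is Python's very value.
def raceSecond (deers : List (String × List (String × Int)))
    (state : List (String × PySem.Dict String Int)) (t : Int) :
    List (String × PySem.Dict String Int) :=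
  let r := state.foldl
    (fun acc p => (acc.1 ++ [(p.1, raceUpd deers t p)],
                   max acc.2 ((raceUpd deers t p).getD "dist" 0)))
    (([], 0) : List (String × PySem.Dict String Int) × Int)
  r.1.map (fun p => (p.1, p.2.insert "score"
    (p.2.getD "score" 0 + if p.2.getD "dist" 0 == r.2 then 1 else 0)))

def race_for (deers : List (String × List (String × Int))) (time : Int) :
    List (String × List (String × Int)) :=
  -- dict comprehension building `state`; Pre_ gives pairwise-distinct names, so it is this list in order
  let state0 := deers.map (fun p => (p.1, PySem.Dict.mk
    [("dist", (0 : Int)), ("score", (0 : Int)), ("running", (1 : Int)),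
     ("switcht", (PySem.Dict.mk p.2).getD "runtime" 0)]))
  let state := (PySem.List.pyRange 1 (time + 1)).foldl (raceSecond deers) state0
  state.map (fun p => (p.1, p.2.items))

-- ===== PORT B =====
-- per-deer simulation of one second: returns updated (dist, running, switcht, trace)
def simStep (deer : PySem.Dict String Int) (acc : Int × Int × Int × List Int) (t : Int) :
    Int × Int × Int × List Int :=
  let d := acc.1 + acc.2.1 * deer.getD "speed" 0
  let rw := if t == acc.2.2.1 then
      (PySem.Int.mod (acc.2.1 + 1) 2,
       t + (if acc.2.1 != 0 then deer.getD "resttime" 0 else deer.getD "runtime" 0))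
    else (acc.2.1, acc.2.2.1)
  (d, rw.1, rw.2, acc.2.2.2 ++ [d])

-- per-deer simulation of all seconds: returns (dist, running, switcht, trace)
def simDeer (deer : PySem.Dict String Int) (ts : List Int) : Int × Int × Int × List Int :=
  ts.foldl (simStep deer) (0, 1, deer.getD "runtime" 0, [])

-- one iteration of the scoring pass: m = max([0] + column i); award 1 to every deer matching m
def scoreStep (sims : List (String × (Int × Int × Int × List Int)))
    (sc : List Int) (i : Int) : List Int :=
  let m := (PySem.List.max? ((0 : Int) :: sims.map (fun s => PySem.List.pyGetD s.2.2.2.2 i 0))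
    (fun x => x)).getD 0   -- the list is nonempty, so max? is some
  (sc.zip sims).map (fun q => q.1 + if PySem.List.pyGetD q.2.2.2.2.2 i 0 == m then 1 else 0)

def race_for_alt (deers : List (String × List (String × Int))) (time : Int) :
    List (String × List (String × Int)) :=
  let ts := PySem.List.pyRange 1 (time + 1)
  let sims := deers.map (fun p => (p.1, simDeer (PySem.Dict.mk p.2) ts))
  let scores := (PySem.List.pyRange 0 time).foldl (scoreStep sims)
    (deers.map (fun _ => (0 : Int)))
  (sims.zip scores).map (fun q => (q.1.1, (PySem.Dict.mk
    [("dist", q.1.2.1), ("score", q.2), ("running", q.1.2.2.1),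
     ("switcht", q.1.2.2.2.1)]).items))

-- ===== PRECONDITION & SPEC =====
-- Pre_ excludes (a) association lists with duplicate keys (outer names or inner stat keys), which do not
-- denote a Python dict, so first-vs-last lookup there is accidental; and (b) exactly the inputs where A
-- raises KeyError: 'runtime' missing, 'speed' missing when time ≥ 1, or 'resttime' missing when the
-- first switch (at second `runtime`) falls inside 1..time.
def Pre_race_for (deers : List (String × List (String × Int))) (time : Int) : Prop :=
  (deers.map Prod.fst).Nodup ∧ ∀ p ∈ deers,
    (p.2.map Prod.fst).Nodup ∧
    (PySem.Dict.mk p.2).contains "runtime" = true ∧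
    (1 ≤ time → (PySem.Dict.mk p.2).contains "speed" = true ∧
      (1 ≤ (PySem.Dict.mk p.2).getD "runtime" 0 ∧ (PySem.Dict.mk p.2).getD "runtime" 0 ≤ time →
        (PySem.Dict.mk p.2).contains "resttime" = true))
instance (deers : List (String × List (String × Int))) (time : Int) :
    Decidable (Pre_race_for deers time) := by unfold Pre_race_for; infer_instance

def pvWitness_race_for : (List (String × List (String × Int))) × Int :=
  ([("Comet", [("speed", 2), ("runtime", 1), ("resttime", 3)]),
    ("Dancer", [("speed", 4), ("runtime", 2), ("resttime", 1)])], 6)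

def Spec_race_for (deers : List (String × List (String × Int))) (time : Int)
    (out : List (String × List (String × Int))) : Prop := out = race_for_alt deers time
instance (deers : List (String × List (String × Int))) (time : Int)
    (out : List (String × List (String × Int))) : Decidable (Spec_race_for deers time out) := by
  unfold Spec_race_for; infer_instance

-- ===== CLAIM (what is proved, stated in full; the proofs are below) =====
def Claim_equal_race_for : Prop := ∀ (deers : List (String × List (String × Int))) (time : Int),
  Dom_race_for deers time → Pre_race_for deers time →
  Spec_race_for deers time (race_for deers time)

-- ===== LEMMAS AND PROOFS =====

-- the pure per-deer model both ports are reduced to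
def prmD (ys : List (String × Int)) : Int × Int × Int :=
  ((PySem.Dict.mk ys).getD "speed" 0, (PySem.Dict.mk ys).getD "runtime" 0,
   (PySem.Dict.mk ys).getD "resttime" 0)

def stepD (P : Int × Int × Int) (x : Int × Int × Int) (t : Int) : Int × Int × Int :=
  let d := x.1 + x.2.1 * P.1
  if t == x.2.2 then
    (d, PySem.Int.mod (x.2.1 + 1) 2, t + (if x.2.1 != 0 then P.2.2 else P.2.1))
  else (d, x.2.1, x.2.2)

def FD (ys : List (String × Int)) (l : List Int) : Int × Int × Int :=
  l.foldl (stepD (prmD ys)) (0, 1, (prmD ys).2.1)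

def dmaxD (deers : List (String × List (String × Int))) (l : List Int) : Int :=
  deers.foldl (fun m q => max m (FD q.2 l).1) 0

def scoreD (deers : List (String × List (String × Int))) (ys : List (String × Int))
    (l : List Int) : Int :=
  ((l.inits.tail).countP (fun pre => (FD ys pre).1 == dmaxD deers pre) : Int)

def stDict (x : Int × Int × Int) (s : Int) : PySem.Dict String Int :=
  PySem.Dict.mk [("dist", x.1), ("score", s), ("running", x.2.1), ("switcht", x.2.2)]

def traceD (P : Int × Int × Int) (x : Int × Int × Int) : List Int → List Int
  | [] => []
  | t :: l => (stepD P x t).1 :: traceD P (stepD P x t) l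


lemma FD_append (ys : List (String × Int)) (l : List Int) (t : Int) :
    FD ys (l ++ [t]) = stepD (prmD ys) (FD ys l) t := by
  simp [FD]

lemma lookup_self (deers : List (String × List (String × Int)))
    (hnd : (deers.map Prod.fst).Nodup) {q : String × List (String × Int)} (hq : q ∈ deers) :
    (PySem.Dict.mk deers).getD q.1 [] = q.2 := by
  exact PySem.Dict.getD_of_mem_items _ hq hnd []

lemma raceUpd_eval (deers : List (String × List (String × Int)))
    (hnd : (deers.map Prod.fst).Nodup) (t : Int) {q : String × List (String × Int)}
    (hq : q ∈ deers) (x : Int × Int × Int) (s : Int) :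
    raceUpd deers t (q.1, stDict x s) = stDict (stepD (prmD q.2) x t) s := by
  have hlook : (PySem.Dict.mk deers).getD (q.1, stDict x s).1 [] = q.2 :=
    lookup_self deers hnd hq
  unfold raceUpd
  rw [hlook]
  show (if t == x.2.2 then
      PySem.Dict.mk [("dist", x.1 + x.2.1 * (PySem.Dict.mk q.2).getD "speed" 0), ("score", s),
        ("running", PySem.Int.mod (x.2.1 + 1) 2),
        ("switcht", t + (if x.2.1 != 0 then (PySem.Dict.mk q.2).getD "resttime" 0
          else (PySem.Dict.mk q.2).getD "runtime" 0))]
    else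
      PySem.Dict.mk [("dist", x.1 + x.2.1 * (PySem.Dict.mk q.2).getD "speed" 0), ("score", s),
        ("running", x.2.1), ("switcht", x.2.2)]) = _
  cases hc : (t == x.2.2) <;> simp_all [stDict, stepD, prmD]

lemma scoreInsert_eval (x : Int × Int × Int) (s c : Int) :
    (stDict x s).insert "score" ((stDict x s).getD "score" 0 + c) = stDict x (s + c) := by
  rfl

lemma scoreD_snoc (deers : List (String × List (String × Int))) (ys : List (String × Int))
    (l : List Int) (t : Int) :
    scoreD deers ys (l ++ [t]) =
      scoreD deers ys l + (if (FD ys (l ++ [t])).1 == dmaxD deers (l ++ [t]) then 1 else 0) := by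
  unfold scoreD
  rw [List.inits_append, List.tail_append]
  have h1 : (List.inits l).isEmpty = false := by
    cases l <;> rfl
  simp [h1, List.countP_append]

-- one pass of A's two inner loops, as a map plus the dist_max fold
lemma raceFold_split (deers : List (String × List (String × Int))) (t : Int)
    (l : List (String × PySem.Dict String Int)) (a : List (String × PySem.Dict String Int))
    (m : Int) :
    l.foldl (fun acc p => (acc.1 ++ [(p.1, raceUpd deers t p)],
        max acc.2 ((raceUpd deers t p).getD "dist" 0))) (a, m) =
      (a ++ l.map (fun p => (p.1, raceUpd deers t p)),
       l.foldl (fun m p => max m ((raceUpd deers t p).getD "dist" 0)) m) := by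
  rw [PySem.List.foldl_prod_mk (f := fun a p => a ++ [(p.1, raceUpd deers t p)])
    (g := fun m p => max m ((raceUpd deers t p).getD "dist" 0)),
    PySem.List.foldl_append_singleton_eq_map]

lemma raceSecond_eval (deers : List (String × List (String × Int))) (t : Int)
    (st : List (String × PySem.Dict String Int)) :
    raceSecond deers st t =
      st.map (fun p => (p.1, (raceUpd deers t p).insert "score"
        ((raceUpd deers t p).getD "score" 0 +
          if (raceUpd deers t p).getD "dist" 0 ==
            st.foldl (fun m p => max m ((raceUpd deers t p).getD "dist" 0)) 0 then 1 else 0))) := by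
  unfold raceSecond
  rw [raceFold_split, List.nil_append, List.map_map]
  rfl

-- A's whole per-time-step fold, characterised
lemma raceMain (deers : List (String × List (String × Int)))
    (hnd : (deers.map Prod.fst).Nodup) (l : List Int) :
    l.foldl (raceSecond deers)
        (deers.map (fun p => (p.1, PySem.Dict.mk
          [("dist", (0 : Int)), ("score", (0 : Int)), ("running", (1 : Int)),
           ("switcht", (PySem.Dict.mk p.2).getD "runtime" 0)]))) =
      deers.map (fun p => (p.1, stDict (FD p.2 l) (scoreD deers p.2 l))) := by
  induction l using List.reverseRecOn with
  | nil => rfl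
  | append_singleton l t ih =>
    rw [List.foldl_append, List.foldl_cons, List.foldl_nil, ih, raceSecond_eval]
    have hdm : (deers.map (fun p => (p.1, stDict (FD p.2 l) (scoreD deers p.2 l)))).foldl
        (fun m p => max m ((raceUpd deers t p).getD "dist" 0)) 0 = dmaxD deers (l ++ [t]) := by
      rw [List.foldl_map]
      refine PySem.List.foldl_congr_mem _ _ _ _ ?_
      intro m q hq
      rw [raceUpd_eval deers hnd t hq]
      show max m (stepD (prmD q.2) (FD q.2 l) t).1 = _
      rw [← FD_append]
    rw [hdm, List.map_map]
    refine List.map_congr_left ?_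
    intro q hq
    show (q.1, (raceUpd deers t (q.1, stDict (FD q.2 l) (scoreD deers q.2 l))).insert "score" _) = _
    rw [raceUpd_eval deers hnd t hq, ← FD_append]
    show (q.1, (stDict (FD q.2 (l ++ [t])) (scoreD deers q.2 l)).insert "score"
      ((stDict (FD q.2 (l ++ [t])) (scoreD deers q.2 l)).getD "score" 0 +
        if (FD q.2 (l ++ [t])).1 == dmaxD deers (l ++ [t]) then 1 else 0)) = _
    rw [scoreInsert_eval, ← scoreD_snoc]

-- B's simulation fold, characterised
def prmOf (dd : PySem.Dict String Int) : Int × Int × Int :=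
  (dd.getD "speed" 0, dd.getD "runtime" 0, dd.getD "resttime" 0)

lemma simStep_eval (dd : PySem.Dict String Int) (d r w : Int) (tr : List Int) (t : Int) :
    simStep dd (d, r, w, tr) t =
      ((stepD (prmOf dd) (d, r, w) t).1, (stepD (prmOf dd) (d, r, w) t).2.1,
       (stepD (prmOf dd) (d, r, w) t).2.2, tr ++ [(stepD (prmOf dd) (d, r, w) t).1]) := by
  cases hc : (t == w) <;> simp [simStep, stepD, prmOf, hc]

lemma simDeer_aux (dd : PySem.Dict String Int) (l : List Int) (d r w : Int)
    (tr : List Int) :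
    l.foldl (simStep dd) (d, r, w, tr) =
    ((l.foldl (stepD (prmOf dd)) (d, r, w)).1, (l.foldl (stepD (prmOf dd)) (d, r, w)).2.1,
     (l.foldl (stepD (prmOf dd)) (d, r, w)).2.2, tr ++ traceD (prmOf dd) (d, r, w) l) := by
  induction l generalizing d r w tr with
  | nil => simp [traceD]
  | cons t l ih =>
    rw [List.foldl_cons, simStep_eval]
    rw [show ((stepD (prmOf dd) (d, r, w) t).1, (stepD (prmOf dd) (d, r, w) t).2.1,
      (stepD (prmOf dd) (d, r, w) t).2.2, tr ++ [(stepD (prmOf dd) (d, r, w) t).1]) =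
      ((stepD (prmOf dd) (d, r, w) t).1, (stepD (prmOf dd) (d, r, w) t).2.1,
       (stepD (prmOf dd) (d, r, w) t).2.2, tr ++ [(stepD (prmOf dd) (d, r, w) t).1]) from rfl]
    rw [ih]
    simp [traceD]

lemma simDeer_spec (dd : PySem.Dict String Int) (ts : List Int) :
    simDeer dd ts =
      ((ts.foldl (stepD (prmOf dd)) (0, 1, (prmOf dd).2.1)).1,
       (ts.foldl (stepD (prmOf dd)) (0, 1, (prmOf dd).2.1)).2.1,
       (ts.foldl (stepD (prmOf dd)) (0, 1, (prmOf dd).2.1)).2.2,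
       traceD (prmOf dd) (0, 1, (prmOf dd).2.1) ts) := by
  have h := simDeer_aux dd ts 0 1 (dd.getD "runtime" 0) []
  simpa [simDeer, prmOf] using h

lemma traceD_getD (P x : Int × Int × Int) (l : List Int) (k : Nat) (hk : k < l.length) :
    (traceD P x l).getD k 0 = ((l.take (k + 1)).foldl (stepD P) x).1 := by
  induction l generalizing x k with
  | nil => simp at hk
  | cons t l ih =>
    cases k with
    | zero => rfl
    | succ k =>
      simp only [traceD, List.getD_cons_succ, List.take_succ_cons, List.foldl_cons]
      exact ih (stepD P x t) k (by simpa using hk)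

lemma len_pyRange1 (n : Nat) : (PySem.List.pyRange 1 ((n : Int) + 1)).length = n := by
  induction n with
  | zero => rfl
  | succ k ih =>
    rw [show ((k + 1 : Nat) : Int) + 1 = ((k : Int) + 1) + 1 by push_cast; ring,
      PySem.List.pyRange_one_succ_right (by omega)]
    simp [ih]

lemma take_pyRange1 (n N : Nat) (h : n ≤ N) :
    (PySem.List.pyRange 1 ((N : Int) + 1)).take n = PySem.List.pyRange 1 ((n : Int) + 1) := by
  rw [PySem.List.pyRange_one_append 1 ((n : Int) + 1) ((N : Int) + 1) (by omega)
    (by omega)]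
  exact List.take_left' (len_pyRange1 n)

-- B's scoring fold, characterised
lemma scoreFold (deers : List (String × List (String × Int))) (N : Nat) (n : Nat) (h : n ≤ N) :
    (PySem.List.pyRange 0 (n : Int)).foldl
        (scoreStep (deers.map (fun p => (p.1, simDeer (PySem.Dict.mk p.2)
          (PySem.List.pyRange 1 ((N : Int) + 1))))))
        (deers.map (fun _ => (0 : Int))) =
      deers.map (fun q => scoreD deers q.2 (PySem.List.pyRange 1 ((n : Int) + 1))) := by
  induction n with
  | zero => rfl
  | succ n ih =>
    have hcast : ((n + 1 : Nat) : Int) = (n : Int) + 1 := by push_cast; ring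
    have hsnoc : PySem.List.pyRange 1 (((n : Int) + 1) + 1) =
        PySem.List.pyRange 1 ((n : Int) + 1) ++ [(n : Int) + 1] :=
      PySem.List.pyRange_one_succ_right (by omega)
    rw [hcast, show PySem.List.pyRange 0 ((n : Int) + 1) =
        PySem.List.pyRange 0 (n : Int) ++ [(n : Int)] from
        PySem.List.pyRange_one_succ_right (by omega),
      List.foldl_append, ih (by omega), List.foldl_cons, List.foldl_nil]
    -- the trace entry read at index n is the deer's distance after second n+1
    have hcol : ∀ q ∈ deers, PySem.List.pyGetD
        (simDeer (PySem.Dict.mk q.2) (PySem.List.pyRange 1 ((N : Int) + 1))).2.2.2 (n : Int) 0 =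
        (FD q.2 (PySem.List.pyRange 1 (((n : Int) + 1) + 1))).1 := by
      intro q _
      rw [simDeer_spec, PySem.List.pyGetD_natCast]
      show (traceD (prmD q.2) (0, 1, (prmD q.2).2.1)
        (PySem.List.pyRange 1 ((N : Int) + 1))).getD n 0 = _
      rw [traceD_getD _ _ _ n (by rw [len_pyRange1]; omega), take_pyRange1 (n + 1) N (by omega),
        hcast]
      rfl
    have hsims : (deers.map (fun p => (p.1, simDeer (PySem.Dict.mk p.2)
          (PySem.List.pyRange 1 ((N : Int) + 1))))).map
            (fun s => PySem.List.pyGetD s.2.2.2.2 (n : Int) 0) =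
        deers.map (fun q => (FD q.2 (PySem.List.pyRange 1 (((n : Int) + 1) + 1))).1) := by
      rw [List.map_map]
      exact List.map_congr_left (fun q hq => hcol q hq)
    have hdm : (PySem.List.max? ((0 : Int) :: deers.map
          (fun q => (FD q.2 (PySem.List.pyRange 1 (((n : Int) + 1) + 1))).1))
          (fun x => x)).getD 0 =
        dmaxD deers (PySem.List.pyRange 1 (((n : Int) + 1) + 1)) := by
      rw [PySem.List.max?_id_cons, Option.getD_some, dmaxD, List.foldl_map]
    simp only [scoreStep]
    rw [hsims, hdm, List.zip_map', List.map_map]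
    refine List.map_congr_left ?_
    intro q hq
    simp only [Function.comp_apply]
    rw [hcol q hq, hsnoc, scoreD_snoc]

-- ===== VERDICT (by name: the statement is the Claim_ definition above) =====
theorem race_for_spec : Claim_equal_race_for := by
  intro deers time hdom hpre
  obtain ⟨hnd, -⟩ := hpre
  unfold Spec_race_for race_for race_for_alt
  dsimp only
  rw [raceMain deers hnd]
  by_cases hpos : 0 ≤ time
  · obtain ⟨N, rfl⟩ : ∃ N : Nat, time = (N : Int) := ⟨time.toNat, (Int.toNat_of_nonneg hpos).symm⟩
    rw [scoreFold deers N N le_rfl, List.zip_map', List.map_map, List.map_map]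
    refine List.map_congr_left ?_
    intro q hq
    simp only [Function.comp_apply]
    rw [simDeer_spec]
    rfl
  · have h1 : PySem.List.pyRange 1 (time + 1) = [] := PySem.List.pyRange_one_eq_nil (by omega)
    have h2 : PySem.List.pyRange 0 time = [] := PySem.List.pyRange_one_eq_nil (by omega)
    rw [h1, h2, List.foldl_nil, List.zip_map', List.map_map, List.map_map]
    rfl
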